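-- pv_equiv track=rewrite | github.com/Clair-Yves/Labyrinth | Labyrinthe/GUI.py | readLabi
-- ===== SOURCE A (Python) =====
-- def readLabi(LabiString):
--     '''return the number of characters per line and number of line of a labiString'''
--     listeOfListes = []
--     liste = []
--     for char in LabiString:
--         if char != '\n':
--             liste.append(char)
--         else:
--             listeOfListes.append(liste)
--             liste = []
--     listeOfListes.append(liste)
--
--     CharactersWidth = len(listeOfListes[0])
--     LineHeight = len(listeOfListes)
--     return CharactersWidth, LineHeight
-- ===== SOURCE B (Python) =====
-- def readLabi(LabiString):
--     '''return the number of characters per line and number of line of a labiString'''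
--     w = LabiString.find('\n')
--     if w == -1:
--         w = len(LabiString)
--     return w, LabiString.count('\n') + 1
-- ===== Notes on version B (the rewrite author's own statement) =====
-- stated objective: simpler
-- what changed: Replaces the char-by-char loop that builds a list of line lists with two direct string queries: width = index of the first newline via find (or len when absent), height = count of newlines + 1.
import Mathlib
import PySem

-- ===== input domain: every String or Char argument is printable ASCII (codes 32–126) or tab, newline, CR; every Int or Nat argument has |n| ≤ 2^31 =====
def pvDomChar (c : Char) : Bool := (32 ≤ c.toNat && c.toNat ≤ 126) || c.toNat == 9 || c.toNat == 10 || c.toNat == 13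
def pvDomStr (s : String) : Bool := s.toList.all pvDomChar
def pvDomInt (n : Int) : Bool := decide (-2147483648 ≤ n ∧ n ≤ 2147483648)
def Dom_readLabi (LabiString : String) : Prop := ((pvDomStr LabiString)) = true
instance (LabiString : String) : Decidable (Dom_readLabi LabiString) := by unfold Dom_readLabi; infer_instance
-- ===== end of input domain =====

-- B replaces A's loop that accumulates a list of line lists by two direct string
-- queries (index of the first newline / newline count); objective: simpler.

-- ===== PORT A =====
-- the for-loop over the characters, with its state (listeOfListes, liste)
def readLabi (LabiString : String) : Int × Int :=
  let r := LabiString.toList.foldl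
    (fun (st : List (List Char) × List Char) char =>
      if char ≠ '\n' then (st.1, st.2 ++ [char])
      else (st.1 ++ [st.2], ([] : List Char)))
    (([] : List (List Char)), ([] : List Char))
  let listeOfListes := r.1 ++ [r.2]
  -- listeOfListes[0]: the list is nonempty by construction (a final append), so index 0 exists
  (((listeOfListes.headD []).length : Int), (listeOfListes.length : Int))

-- ===== PORT B =====
def readLabi_alt (LabiString : String) : Int × Int :=
  let f := PySem.Str.find LabiString "\n"
  let w := if f = -1 then PySem.Str.len LabiString else f
  (w, (PySem.Str.count LabiString "\n" : Int) + 1)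

-- ===== PRECONDITION & SPEC =====
def Spec_readLabi (LabiString : String) (out : Int × Int) : Prop := out = readLabi_alt LabiString
instance (LabiString : String) (out : Int × Int) : Decidable (Spec_readLabi LabiString out) := by unfold Spec_readLabi; infer_instance

-- ===== CLAIM (what is proved, stated in full; the proofs are below) =====
def Claim_equal_readLabi : Prop := ∀ (LabiString : String), Dom_readLabi LabiString → Spec_readLabi LabiString (readLabi LabiString)

-- ===== LEMMAS AND PROOFS =====

-- Chars.count for a single-character needle is the plain character count.
theorem pv_count_go_singleton (c : Char) (fuel : Nat) :
    ∀ (l : List Char) (acc : Nat), l.length ≤ fuel →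
      PySem.Chars.count.go [c] fuel l acc = acc + l.count c := by
  induction fuel with
  | zero =>
    intro l acc h
    cases l with
    | nil => simp [PySem.Chars.count.go]
    | cons a t => simp at h
  | succ fuel ih =>
    intro l acc h
    cases l with
    | nil => simp [PySem.Chars.count.go]
    | cons a t =>
      by_cases hac : a = c
      · subst hac
        have : List.isPrefixOf [a] (a :: t) = true := by simp [List.isPrefixOf]
        have hd : List.drop [a].length (a :: t) = t := by simp
        simp only [PySem.Chars.count.go, this, if_pos, hd]
        rw [ih t (acc + 1) (by simpa using Nat.le_of_succ_le_succ h)]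
        simp
        omega
      · have : List.isPrefixOf [c] (a :: t) = false := by
          simp [List.isPrefixOf]
          intro h'; exact absurd h'.symm hac
        simp only [PySem.Chars.count.go, this]
        rw [ih t acc (by simpa using Nat.le_of_succ_le_succ h)]
        simp [hac]

theorem pv_count_singleton (s : List Char) (c : Char) :
    PySem.Chars.count s [c] = s.count c := by
  simpa [PySem.Chars.count] using pv_count_go_singleton c s.length s 0 le_rfl

-- [c] is a prefix of l iff l starts with c
theorem pv_singleton_prefix (c : Char) (l : List Char) :
    [c] <+: l ↔ l.head? = some c := by
  cases l with
  | nil => simp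
  | cons a t => simp [List.cons_prefix_cons, eq_comm]

theorem pv_singleton_prefix_drop (c : Char) (s : List Char) (i : Nat) :
    [c] <+: s.drop i ↔ s[i]? = some c := by
  rw [pv_singleton_prefix, List.head?_drop]

theorem pv_singleton_infix (c : Char) (s : List Char) :
    [c] <:+: s ↔ c ∈ s := by
  constructor
  · intro h; exact h.sublist.mem (by simp)
  · intro h
    obtain ⟨u, v, rfl⟩ := List.append_of_mem h
    exact ⟨u, v, by simp⟩

-- Chars.find for a single character: first index, or -1 if absent,
-- expressed through takeWhile
theorem pv_find_singleton (s : List Char) (c : Char) :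
    PySem.Chars.find s [c] =
      if c ∈ s then ((s.takeWhile (· ≠ c)).length : Int) else -1 := by
  by_cases hc : c ∈ s
  · simp only [hc, if_pos]
    set tw := s.takeWhile (· ≠ c) with htw
    set n := tw.length with hn
    have hsplit : tw ++ s.dropWhile (· ≠ c) = s := List.takeWhile_append_dropWhile
    have hdwne : s.dropWhile (· ≠ c) ≠ [] := by
      intro h0
      have : tw = s := by rw [← hsplit, h0, List.append_nil]
      have : c ∈ tw := this ▸ hc
      have := List.mem_takeWhile_imp this
      simp at this
    have hpa := List.head_dropWhile_not (fun x => decide (x ≠ c)) hdwne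
    have hheadc : (s.dropWhile (· ≠ c)).head hdwne = c := by simpa using hpa
    have hhead : (s.dropWhile (· ≠ c)).head? = some c := by
      rw [List.head?_eq_some_head hdwne, hheadc]
    have hgetn : s[n]? = some c := by
      conv_lhs => rw [← hsplit]
      rw [List.getElem?_append_right (by simp [hn])]
      simpa [hn, ← List.head?_eq_getElem?] using hhead
    have hbefore : ∀ i, i < n → s[i]? ≠ some c := by
      intro i hi hsi
      rw [← hsplit, List.getElem?_append_left (by omega)] at hsi
      have hmem : c ∈ tw := by
        have := List.getElem?_eq_some_iff.mp hsi
        obtain ⟨h1, h2⟩ := this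
        exact h2 ▸ List.getElem_mem h1
      have := List.mem_takeWhile_imp hmem
      simp at this
    have hinf : [c] <:+: s := (pv_singleton_infix c s).mpr hc
    have hne : PySem.Chars.find s [c] ≠ -1 := (PySem.Chars.find_ne_neg_one_iff s [c]).mpr hinf
    have hle : -1 ≤ PySem.Chars.find s [c] := PySem.Chars.neg_one_le_find s [c]
    have hpos : 0 ≤ PySem.Chars.find s [c] := by omega
    obtain ⟨hpref, hmin⟩ := PySem.Chars.find_spec (s := s) (sub := [c]) hpos
    set k := (PySem.Chars.find s [c]).toNat with hk
    have hgk : s[k]? = some c := (pv_singleton_prefix_drop c s k).mp hpref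
    have hkn : k = n := by
      rcases Nat.lt_trichotomy k n with h | h | h
      · exact absurd hgk (hbefore k h)
      · exact h
      · exact absurd ((pv_singleton_prefix_drop c s n).mpr hgetn) (hmin n h)
    omega
  · simp only [hc, if_false]
    exact (PySem.Chars.find_eq_neg_one_iff s [c]).mpr
      (fun h => hc ((pv_singleton_infix c s).mp h))

-- A's loop, abstracted
def pvF : (List (List Char) × List Char) → Char → (List (List Char) × List Char) :=
  fun st char =>
    if char ≠ '\n' then (st.1, st.2 ++ [char])
    else (st.1 ++ [st.2], ([] : List Char))

theorem pv_loop_len (s : List Char) :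
    ∀ (lls : List (List Char)) (cur : List Char),
      ((s.foldl pvF (lls, cur)).1 ++ [(s.foldl pvF (lls, cur)).2]).length
        = lls.length + 1 + s.count '\n' := by
  induction s with
  | nil => intro lls cur; simp
  | cons a t ih =>
    intro lls cur
    by_cases ha : a = '\n'
    · subst ha
      simp only [List.foldl_cons, pvF, ne_eq, not_true_eq_false, if_false]
      rw [ih (lls ++ [cur]) []]
      simp
      omega
    · simp only [List.foldl_cons, pvF, ne_eq, ha, not_false_eq_true, if_pos]
      rw [ih lls (cur ++ [a])]
      simp [ha]

theorem pv_loop_head (s : List Char) :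
    ∀ (lls : List (List Char)) (cur : List Char),
      ((s.foldl pvF (lls, cur)).1 ++ [(s.foldl pvF (lls, cur)).2]).headD []
        = (lls ++ [cur ++ s.takeWhile (· ≠ '\n')]).headD [] := by
  induction s with
  | nil => intro lls cur; simp
  | cons a t ih =>
    intro lls cur
    by_cases ha : a = '\n'
    · subst ha
      simp only [List.foldl_cons, pvF, ne_eq, not_true_eq_false, if_false]
      rw [ih (lls ++ [cur]) []]
      rw [List.takeWhile_cons]
      simp only [ne_eq, not_true_eq_false, decide_false]
      cases lls <;> simp
    · simp only [List.foldl_cons, pvF, ne_eq, ha, not_false_eq_true, if_pos]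
      rw [ih lls (cur ++ [a])]
      rw [List.takeWhile_cons]
      simp only [ne_eq, ha, not_false_eq_true, decide_true]
      cases lls <;> simp

-- closed forms of the two ports
theorem pv_readLabi_eq (s : String) :
    readLabi s = (((s.toList.takeWhile (· ≠ '\n')).length : Int),
                  (1 + s.toList.count '\n' : Int)) := by
  unfold readLabi
  have hf : (fun (st : List (List Char) × List Char) char =>
      if char ≠ '\n' then (st.1, st.2 ++ [char])
      else (st.1 ++ [st.2], ([] : List Char))) = pvF := rfl
  simp only [hf]
  have h1 := pv_loop_head s.toList [] []
  have h2 := pv_loop_len s.toList [] []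
  simp only [List.nil_append, List.headD_cons] at h1
  rw [h1, h2, Prod.mk.injEq]
  refine ⟨rfl, ?_⟩
  push_cast
  simp

theorem pv_readLabi_alt_eq (s : String) :
    readLabi_alt s = ((if '\n' ∈ s.toList
                        then ((s.toList.takeWhile (· ≠ '\n')).length : Int)
                        else (s.toList.length : Int)),
                      (s.toList.count '\n' : Int) + 1) := by
  unfold readLabi_alt
  have hfind : PySem.Str.find s "\n" = PySem.Chars.find s.toList ['\n'] := by
    simp [PySem.Str.find_eq]
  have hcount : PySem.Str.count s "\n" = s.toList.count '\n' := by
    rw [PySem.Str.count_eq]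
    exact pv_count_singleton s.toList '\n'
  have hlen : PySem.Str.len s = (s.toList.length : Int) := by
    simp [PySem.Str.len_eq]
  rw [hfind, pv_find_singleton, hcount, hlen]
  by_cases hm : '\n' ∈ s.toList
  · simp [hm]
  · simp [hm]

-- ===== VERDICT (by name: the statement is the Claim_ definition above) =====
theorem readLabi_spec : Claim_equal_readLabi := by
  intro s _
  unfold Spec_readLabi
  rw [pv_readLabi_eq, pv_readLabi_alt_eq]
  by_cases hm : '\n' ∈ s.toList
  · simp [hm, Prod.ext_iff]; omega
  · have htw : s.toList.takeWhile (fun x => !decide (x = '\n')) = s.toList := by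
      rw [List.takeWhile_eq_self_iff]
      intro x hx
      simp
      exact fun h => hm (h ▸ hx)
    have hsl : s.toList.length = s.length := by simp
    simp [hm, Prod.ext_iff, htw]
    omega
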